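-- pv_equiv track=rewrite | github.com/softwaresafer/VeriBuild | src/Util/operation.py | get_childRelationMatrix
-- ===== SOURCE A (Python) =====
-- def get_childRelationMatrix(CDG):
--     relationMatrix = {}
--     for target in CDG.keys():
--         relationMatrix[target] = {}
--         for pre in CDG.keys():
--             if (pre == target):
--                 relationMatrix[target][pre] = True
--                 continue
--             if (pre in CDG[target]):
--                 relationMatrix[target][pre] = True
--             else:
--                 relationMatrix[target][pre] = False
--     return relationMatrix
-- ===== SOURCE B (Python) =====
-- def get_childRelationMatrix(CDG):
--     relationMatrix = {}
--     for target, members in CDG.items():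
--         row = dict.fromkeys(CDG, False)
--         row[target] = True
--         for member in members:
--             if member in row:
--                 row[member] = True
--         relationMatrix[target] = row
--     return relationMatrix
-- ===== Notes on version B (the rewrite author's own statement) =====
-- stated objective: faster
-- what changed: Instead of testing 'pre in CDG[target]' for every (target, pre) pair, B initialises each row to all-False once and then marks True only along the adjacency list of target, so the inner list scan per pair disappears.
import Mathlib
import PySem

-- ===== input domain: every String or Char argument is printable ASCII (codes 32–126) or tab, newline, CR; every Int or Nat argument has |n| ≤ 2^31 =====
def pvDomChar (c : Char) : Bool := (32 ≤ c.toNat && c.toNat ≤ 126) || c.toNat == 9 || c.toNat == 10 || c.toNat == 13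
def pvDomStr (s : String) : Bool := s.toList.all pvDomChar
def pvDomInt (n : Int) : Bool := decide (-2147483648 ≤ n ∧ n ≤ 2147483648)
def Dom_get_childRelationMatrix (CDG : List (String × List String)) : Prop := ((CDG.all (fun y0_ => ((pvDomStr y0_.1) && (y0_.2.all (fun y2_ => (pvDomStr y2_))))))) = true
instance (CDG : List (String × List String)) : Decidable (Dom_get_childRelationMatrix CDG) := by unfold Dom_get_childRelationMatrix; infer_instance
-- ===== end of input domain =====

-- B replaces A's per-pair membership test 'pre in CDG[target]' by initialising each row
-- to all-False and marking True along the adjacency list, removing the inner list scan per pair.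

-- ===== PORT A =====
-- Under Pre_ the keys of CDG are distinct, so every dict entry A writes is at a fresh key:
-- a dict insert is therefore an append of the new pair.
def get_childRelationMatrix (CDG : List (String × List String)) : List (String × List (String × Bool)) :=
  (CDG.map (fun p => p.1)).foldl
    (fun acc target =>
      let members : List String := ((CDG.find? (fun p => p.1 == target)).map (fun p => p.2)).getD []
      let row := (CDG.map (fun p => p.1)).foldl
        (fun r pre =>
          if pre == target then r ++ [(pre, true)]
          else if members.contains pre then r ++ [(pre, true)]
          else r ++ [(pre, false)]) []
      acc ++ [(target, row)]) []

-- ===== PORT B =====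
def get_childRelationMatrix_alt (CDG : List (String × List String)) : List (String × List (String × Bool)) :=
  CDG.map (fun tm =>
    -- row = dict.fromkeys(CDG, False)
    let row0 : PySem.Dict String Bool :=
      CDG.foldl (fun d p => d.insert p.1 false) PySem.Dict.empty
    -- row[target] = True
    let row1 := row0.insert tm.1 true
    -- for member in members: if member in row: row[member] = True
    let row2 := tm.2.foldl (fun d m => if d.contains m then d.insert m true else d) row1
    (tm.1, row2.items))

-- ===== PRECONDITION & SPEC =====
-- Pre_ excludes association lists with duplicate keys: they do not represent any Python dict
-- (A's parameter is a dict, whose keys are necessarily distinct), so nothing is excluded that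
-- the Python function accepts.
def Pre_get_childRelationMatrix (CDG : List (String × List String)) : Prop :=
  (CDG.map (fun p => p.1)).Nodup
instance (CDG : List (String × List String)) : Decidable (Pre_get_childRelationMatrix CDG) := by
  unfold Pre_get_childRelationMatrix; infer_instance
def pvWitness_get_childRelationMatrix : (List (String × List String)) :=
  [("a", ["b", "c"]), ("b", [])]

def Spec_get_childRelationMatrix (CDG : List (String × List String)) (out : List (String × List (String × Bool))) : Prop := out = get_childRelationMatrix_alt CDG
instance (CDG : List (String × List String)) (out : List (String × List (String × Bool))) : Decidable (Spec_get_childRelationMatrix CDG out) := by unfold Spec_get_childRelationMatrix; infer_instance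

-- ===== CLAIM (what is proved, stated in full; the proofs are below) =====
def Claim_equal_get_childRelationMatrix : Prop := ∀ (CDG : List (String × List String)), Dom_get_childRelationMatrix CDG → Pre_get_childRelationMatrix CDG → Spec_get_childRelationMatrix CDG (get_childRelationMatrix CDG)

-- ===== LEMMAS AND PROOFS =====

-- first-match lookup in a nodup-keyed association list finds the member pair itself
lemma find?_eq_self_of_nodup (CDG : List (String × List String))
    (hnd : (CDG.map (fun p => p.1)).Nodup) (tm : String × List String) (h : tm ∈ CDG) :
    CDG.find? (fun p => p.1 == tm.1) = some tm := by
  induction CDG with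
  | nil => cases h
  | cons p rest ih =>
    simp only [List.map_cons, List.nodup_cons] at hnd
    rcases List.mem_cons.mp h with h | h
    · subst h; simp
    · have hp : (p.1 == tm.1) = false := by
        have h1 : tm.1 ∈ rest.map (fun p => p.1) := List.mem_map_of_mem h
        simp only [beq_eq_false_iff_ne, ne_eq]
        intro he; exact hnd.1 (he ▸ h1)
      rw [List.find?_cons_of_neg (by simp [hp]), ih hnd.2 h]

-- marking loop: conditional inserts over a dict with a fixed items shape
lemma items_markLoop (ms : List String) (keys : List String) (f : String → Bool)
    (d : PySem.Dict String Bool) (h : d.items = keys.map (fun k => (k, f k))) :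
    (ms.foldl (fun d m => if d.contains m then d.insert m true else d) d).items
      = keys.map (fun k => (k, f k || ms.contains k)) := by
  induction ms generalizing d f with
  | nil => simpa using h
  | cons m ms ih =>
    have hkeys : d.keys = keys := by
      simp [PySem.Dict.keys, h, List.map_map, Function.comp_def]
    simp only [List.foldl_cons]
    by_cases hm : d.contains m = true
    · rw [if_pos hm]
      have h2 : (d.insert m true).items = keys.map (fun k => (k, f k || (k == m))) := by
        rw [PySem.Dict.items_insert_of_contains d true hm, h, List.map_map]
        apply List.map_congr_left; intro k _
        by_cases hkm : k = m
        · subst hkm; simp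
        · simp [hkm]
      rw [ih _ _ h2]
      apply List.map_congr_left; intro k _
      by_cases hkm : k = m
      · subst hkm; simp
      · simp [beq_eq_false_iff_ne.mpr hkm, hkm]
    · rw [if_neg hm, ih _ _ h]
      apply List.map_congr_left; intro k hk
      have hkm : k ≠ m := by
        intro he
        have : d.contains k = true := by
          rw [PySem.Dict.contains_eq_decide_mem_keys, hkeys]; simpa using hk
        exact hm (he ▸ this)
      simp [hkm]

-- A's inner loop appends one entry per key: it is a map
lemma foldl_rowA (t : String) (ms : List String) (l : List String) (acc : List (String × Bool)) :
    l.foldl (fun r pre =>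
        if pre == t then r ++ [(pre, true)]
        else if ms.contains pre then r ++ [(pre, true)]
        else r ++ [(pre, false)]) acc
      = acc ++ l.map (fun pre => (pre, (pre == t) || ms.contains pre)) := by
  induction l generalizing acc with
  | nil => simp
  | cons x l ih =>
    simp only [List.foldl_cons, List.map_cons]
    by_cases hx : x = t
    · subst hx
      rw [if_pos (beq_self_eq_true x), ih]
      simp
    · have hb : (x == t) = false := beq_eq_false_iff_ne.mpr hx
      rw [if_neg (by simp [hb])]
      by_cases hm : x ∈ ms
      · rw [if_pos (by simpa using hm), ih]; simp [hb, hm]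
      · rw [if_neg (by simpa using hm), ih]; simp [hb, hm]

-- ===== VERDICT (by name: the statement is the Claim_ definition above) =====
theorem get_childRelationMatrix_spec : Claim_equal_get_childRelationMatrix := by
  intro CDG _ hpre
  unfold Spec_get_childRelationMatrix get_childRelationMatrix get_childRelationMatrix_alt
  -- A's outer loop is a map over CDG
  rw [PySem.List.foldl_append_singleton_eq_map
    (fun target => (target,
      (CDG.map (fun p => p.1)).foldl
        (fun r pre =>
          if pre == target then r ++ [(pre, true)]
          else if (((CDG.find? (fun p => p.1 == target)).map (fun p => p.2)).getD []).contains pre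
            then r ++ [(pre, true)] else r ++ [(pre, false)]) []) ) (CDG.map (fun p => p.1)) []]
  rw [List.map_map]
  apply List.map_congr_left
  intro tm htm
  have hfind := find?_eq_self_of_nodup CDG hpre tm htm
  -- B's row0
  have h0 : (CDG.foldl (fun d p => d.insert p.1 false) PySem.Dict.empty).items
      = (CDG.map (fun p => p.1)).map (fun k => (k, false)) := by
    rw [PySem.Dict.items_foldl_insert_fresh CDG (fun p => p.1) (fun _ => false)
      PySem.Dict.empty (by intro a _; simp) hpre]
    simp [List.map_map, Function.comp, PySem.Dict.empty]
  -- row0 contains the target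
  have hmem : tm.1 ∈ (CDG.foldl (fun d p => d.insert p.1 false) PySem.Dict.empty).keys := by
    simp [PySem.Dict.keys, h0, List.map_map, Function.comp]
    exact ⟨tm.2, htm⟩
  have hc : (CDG.foldl (fun d p => d.insert p.1 false) PySem.Dict.empty).contains tm.1 = true := by
    rw [PySem.Dict.contains_eq_decide_mem_keys]; simpa using hmem
  -- B's row1
  have h1 : ((CDG.foldl (fun d p => d.insert p.1 false) PySem.Dict.empty).insert tm.1 true).items
      = (CDG.map (fun p => p.1)).map (fun k => (k, (k == tm.1))) := by
    rw [PySem.Dict.items_insert_of_contains _ true hc, h0, List.map_map]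
    apply List.map_congr_left; intro k _
    by_cases hk : k = tm.1
    · subst hk; simp
    · simp [hk]
  -- B's row2
  have h2 := items_markLoop tm.2 (CDG.map (fun p => p.1)) (fun k => (k == tm.1)) _ h1
  simp only [Function.comp_apply]
  rw [h2, hfind]
  refine Prod.ext rfl ?_
  simp only [Option.map_some, Option.getD_some]
  refine (foldl_rowA tm.1 tm.2 (CDG.map (fun p => p.1)) []).trans ?_
  simp [List.map_map, Function.comp_def]
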